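-- pv_equiv track=rewrite | github.com/aufgabenpool/aufgabenpool | Tools/conv.py | format_tag
-- ===== SOURCE A (Python) =====
-- def format_tag(tag):
--     # replaces e.g. "TE:1:Differentialrechung" -> "te_1_Differentialrechnung"
--     tag = tag.replace(":", "_")
--     tag_tokens = tag.split("_")
--     tag_new = ""
--     for i, tk in enumerate(tag_tokens):
--         if i < len(tag_tokens) - 1:
--             tk = tk.lower()
--         if len(tag_new) > 0:
--             tag_new += "_"
--         tag_new += tk
--     return tag_new
-- ===== SOURCE B (Python) =====
-- def format_tag(tag):
--     # simpler: strip the leading separators, lowercase the prefix up to the last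
--     # separator via rfind + two slices; no token list, no rejoin loop
--     tag = tag.replace(":", "_").lstrip("_")
--     idx = tag.rfind("_")
--     if idx == -1:
--         return tag
--     return tag[:idx].lower() + tag[idx:]
-- ===== Notes on version B (the rewrite author's own statement) =====
-- stated objective: simpler
-- what changed: Replaces the split-into-tokens / enumerate / rejoin-with-accumulator loop by lstrip of leading separators (which A's accumulator-is-empty join test drops implicitly), one rfind of the last separator, and two slices.
import Mathlib
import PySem

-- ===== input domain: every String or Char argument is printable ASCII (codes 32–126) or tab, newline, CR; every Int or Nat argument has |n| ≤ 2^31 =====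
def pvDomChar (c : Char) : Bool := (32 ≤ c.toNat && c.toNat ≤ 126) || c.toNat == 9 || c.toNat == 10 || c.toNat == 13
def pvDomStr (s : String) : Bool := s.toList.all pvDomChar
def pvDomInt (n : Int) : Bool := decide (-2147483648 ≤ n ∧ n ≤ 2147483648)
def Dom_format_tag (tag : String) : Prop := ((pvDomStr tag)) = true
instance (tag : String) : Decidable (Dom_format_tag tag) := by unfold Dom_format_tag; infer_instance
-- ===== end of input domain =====

-- B replaces A's split/enumerate/rejoin-with-accumulator loop by lstrip of the leading separators (which A's join test drops implicitly), one rfind of the last separator, and two slices (simpler decomposition, same cost).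

-- ===== PORT A =====
-- the body of A's 'for i, tk in enumerate(tag_tokens)' loop, named so the proofs can speak about it
def fmtStep (n : Nat) (acc : List Char) (p : Int × List Char) : List Char :=
  let tk := if p.1 < (n : Int) - 1 then PySem.Chars.lower p.2 else p.2
  let acc' := if 0 < acc.length then acc ++ ['_'] else acc
  acc' ++ tk

def format_tag (tag : String) : String :=
  let tag1 := PySem.Chars.replace tag.toList [':'] ['_']
  let tagTokens := PySem.Chars.splitOn tag1 ['_']
  String.ofList ((PySem.List.enumerate tagTokens).foldl (fmtStep tagTokens.length) [])

-- ===== PORT B =====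
def format_tag_alt (tag : String) : String :=
  let tag1 := PySem.Chars.replace tag.toList [':'] ['_']
  -- hand port of .lstrip("_") (PySem has no lstrip-with-chars): exact, drops the leading '_' run
  let tag2 := tag1.dropWhile (fun c => c == '_')
  let idx := PySem.Chars.rfind tag2 ['_']
  if idx = -1 then String.ofList tag2
  else String.ofList (PySem.Chars.lower (PySem.Chars.slice tag2 none (some idx)) ++
                      PySem.Chars.slice tag2 (some idx) none)

-- ===== PRECONDITION & SPEC =====
def Spec_format_tag (tag : String) (out : String) : Prop := out = format_tag_alt tag
instance (tag : String) (out : String) : Decidable (Spec_format_tag tag out) := by unfold Spec_format_tag; infer_instance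

-- ===== CLAIM (what is proved, stated in full; the proofs are below) =====
def Claim_equal_format_tag : Prop := ∀ (tag : String), Dom_format_tag tag → Spec_format_tag tag (format_tag tag)

-- ===== LEMMAS AND PROOFS =====

def mySplit : List Char → List Char → List (List Char)
  | pre, [] => [pre]
  | pre, c :: t => if c = '_' then pre :: mySplit [] t else mySplit (pre ++ [c]) t

lemma splitOn_go_eq (fuel : Nat) : ∀ (l cur : List Char) (acc : List (List Char)), l.length ≤ fuel →
    PySem.Chars.splitOn.go ['_'] fuel l cur acc = acc.reverse ++ mySplit cur.reverse l := by
  induction fuel with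
  | zero =>
    intro l cur acc h
    have : l = [] := List.eq_nil_of_length_eq_zero (Nat.le_zero.mp h)
    subst this; rw [PySem.Chars.splitOn.go.eq_def]; simp [mySplit]
  | succ n ih =>
    intro l cur acc h
    cases l with
    | nil => rw [PySem.Chars.splitOn.go.eq_def]; simp [mySplit]
    | cons c t =>
      rw [PySem.Chars.splitOn.go.eq_def]
      by_cases hc : c = '_'
      · subst hc
        simp only [List.isPrefixOf, BEq.rfl, Bool.true_and, if_pos, List.length_cons,
          List.length_nil, List.drop_succ_cons, List.drop_zero]
        rw [ih t [] (cur.reverse :: acc) (by simpa using Nat.le_of_succ_le_succ h)]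
        simp [mySplit]
      · have hp : (['_'].isPrefixOf (c :: t)) = false := by
          simp [List.isPrefixOf]; exact fun h' => hc h'.symm
        simp only [hp, Bool.false_eq_true, if_false]
        rw [ih t (c :: cur) acc (by simpa using Nat.le_of_succ_le_succ h)]
        simp [mySplit, hc]

lemma splitOn_eq (l : List Char) : PySem.Chars.splitOn l ['_'] = mySplit [] l := by
  rw [PySem.Chars.splitOn]
  rw [splitOn_go_eq (l.length + 1) l [] [] (by omega)]
  simp

lemma mySplit_no_sep : ∀ (b pre : List Char), '_' ∉ b → mySplit pre b = [pre ++ b] := by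
  intro b
  induction b with
  | nil => simp [mySplit]
  | cons c t ih =>
    intro pre h
    have hc : c ≠ '_' := fun e => h (by simp [e])
    rw [mySplit, if_neg hc, ih _ (fun e => h (List.mem_cons_of_mem _ e))]
    simp

lemma mySplit_append : ∀ (a pre b : List Char),
    mySplit pre (a ++ '_' :: b) = mySplit pre a ++ mySplit [] b := by
  intro a
  induction a with
  | nil => intro pre b; simp [mySplit]
  | cons c t ih =>
    intro pre b
    by_cases hc : c = '_' <;> simp [mySplit, hc, ih]

lemma mySplit_first : ∀ (l pre : List Char), ∃ u ts, mySplit pre l = (pre ++ u) :: ts := by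
  intro l
  induction l with
  | nil => intro pre; exact ⟨[], [], by simp [mySplit]⟩
  | cons c t ih =>
    intro pre
    by_cases hc : c = '_'
    · exact ⟨[], mySplit [] t, by simp [mySplit, hc]⟩
    · obtain ⟨u, ts, hu⟩ := ih (pre ++ [c])
      exact ⟨c :: u, ts, by simp [mySplit, hc, hu]⟩

def joinU : List (List Char) → List Char
  | [] => []
  | t :: ts => t ++ ts.flatMap (fun u => '_' :: u)

lemma joinU_mySplit : ∀ (l pre : List Char), joinU (mySplit pre l) = pre ++ l := by
  intro l
  induction l with
  | nil => intro pre; simp [mySplit, joinU]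
  | cons c t ih =>
    intro pre
    by_cases hc : c = '_'
    · subst hc
      rw [mySplit, if_pos rfl]
      obtain ⟨u, ts, hu⟩ := mySplit_first t []
      have := ih []
      rw [hu] at this ⊢
      simp [joinU] at this ⊢
      simp [this]
    · rw [mySplit, if_neg hc, ih]
      simp

lemma mem_of_pfx {s : List Char} (hp : ['_'].isPrefixOf s = true) : '_' ∈ s :=
  (List.isPrefixOf_iff_prefix.mp hp).subset (by simp)

lemma rfind_go_no (s : List Char) (h : '_' ∉ s) : ∀ (j : Nat), PySem.Chars.rfind.go s ['_'] j = -1 := by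
  intro j
  induction j with
  | zero =>
    rw [PySem.Chars.rfind.go.eq_def]
    simp only
    rw [if_neg]
    exact fun hp => h (mem_of_pfx hp)
  | succ n ih =>
    rw [PySem.Chars.rfind.go.eq_def]
    simp only
    rw [if_neg, ih]
    exact fun hp => h (List.mem_of_mem_drop (mem_of_pfx hp))

lemma rfind_go_at (a b : List Char) (h : '_' ∉ b) :
    ∀ (j : Nat), a.length ≤ j → PySem.Chars.rfind.go (a ++ '_' :: b) ['_'] j = (a.length : Int) := by
  intro j
  induction j with
  | zero =>
    intro hj
    have ha : a = [] := List.eq_nil_of_length_eq_zero (Nat.le_zero.mp hj)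
    subst ha
    rw [PySem.Chars.rfind.go.eq_def]
    simp [List.isPrefixOf]
  | succ n ih =>
    intro hj
    rw [PySem.Chars.rfind.go.eq_def]
    simp only
    rcases Nat.lt_or_ge n a.length with hlt | hge
    · have he : a.length = n + 1 := by omega
      rw [if_pos, he]
      rw [← he, List.drop_left]
      simp [List.isPrefixOf]
    · rw [if_neg, ih hge]
      intro hp
      have hm : '_' ∈ List.drop (n+1) (a ++ '_' :: b) := mem_of_pfx hp
      rw [show (n+1) = a.length + (n+1-a.length) by omega, List.drop_append] at hm
      have hpos : 0 < n + 1 - a.length := by omega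
      rcases Nat.exists_eq_add_of_lt hpos with ⟨k, hk⟩
      rw [show n + 1 - a.length = k + 1 by omega] at hm
      have h1 : List.drop (a.length + (k + 1)) a = [] := List.drop_eq_nil_of_le (by omega)
      rw [h1, List.nil_append, show a.length + (k + 1) - a.length = k + 1 by omega,
        List.drop_succ_cons] at hm
      exact h (List.mem_of_mem_drop hm)

lemma rfind_no (s : List Char) (h : '_' ∉ s) : PySem.Chars.rfind s ['_'] = -1 := by
  rw [PySem.Chars.rfind]; exact rfind_go_no s h _

lemma rfind_at (a b : List Char) (h : '_' ∉ b) :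
    PySem.Chars.rfind (a ++ '_' :: b) ['_'] = (a.length : Int) := by
  rw [PySem.Chars.rfind]
  exact rfind_go_at a b h _ (by simp)

lemma last_sep (cs : List Char) (h : '_' ∈ cs) : ∃ a b, cs = a ++ '_' :: b ∧ '_' ∉ b := by
  induction cs with
  | nil => simp at h
  | cons c t ih =>
    by_cases ht : '_' ∈ t
    · obtain ⟨a, b, rfl, hb⟩ := ih ht
      exact ⟨c :: a, b, rfl, hb⟩
    · have hc : c = '_' := by
        rcases List.mem_cons.mp h with h1 | h1
        · exact h1.symm
        · exact absurd h1 ht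
      exact ⟨[], t, by simp [hc], ht⟩


lemma fmtStep_last (n : Nat) (acc : List Char) (p : Int × List Char) (hacc : acc ≠ [])
    (hp : ¬ p.1 < (n : Int) - 1) : fmtStep n acc p = acc ++ '_' :: p.2 := by
  simp only [fmtStep]
  rw [if_neg hp, if_pos (List.length_pos_iff.mpr hacc)]
  simp

lemma foldMid : ∀ (mid : List (List Char)) (s : Int) (n : Nat) (acc : List Char), acc ≠ [] →
    (∀ k : Nat, k < mid.length → s + k < (n : Int) - 1) →
    (PySem.List.enumerate mid s).foldl (fmtStep n) acc
      = acc ++ mid.flatMap (fun t => '_' :: PySem.Chars.lower t) := by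
  intro mid
  induction mid with
  | nil => intro s n acc _ _; simp [PySem.List.enumerate_nil]
  | cons t mid ih =>
    intro s n acc hacc hk
    rw [PySem.List.enumerate_cons, List.foldl_cons]
    have h0 : s < (n : Int) - 1 := by simpa using hk 0 (by simp)
    have hstep : fmtStep n acc (s, t) = acc ++ '_' :: PySem.Chars.lower t := by
      simp [fmtStep, h0, List.length_pos_iff.mpr hacc]
    rw [hstep, ih (s+1) n _ (by simp [hacc]) (fun k hklt => by
      have := hk (k+1) (by simpa using Nat.succ_lt_succ hklt)
      push_cast at this ⊢
      omega)]
    simp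

lemma foldA_single (t : List Char) :
    (PySem.List.enumerate [t]).foldl (fmtStep 1) [] = t := by
  simp [PySem.List.enumerate_cons, PySem.List.enumerate_nil, fmtStep]

lemma foldA_multi (t0 b : List Char) (mid : List (List Char)) (h0 : t0 ≠ []) :
    (PySem.List.enumerate (t0 :: (mid ++ [b]))).foldl (fmtStep (t0 :: (mid ++ [b])).length) []
      = PySem.Chars.lower t0 ++ mid.flatMap (fun t => '_' :: PySem.Chars.lower t) ++ '_' :: b := by
  have hn : (t0 :: (mid ++ [b])).length = mid.length + 2 := by simp
  rw [hn, PySem.List.enumerate_cons, List.foldl_cons]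
  have hstep0 : fmtStep (mid.length + 2) [] (0, t0) = PySem.Chars.lower t0 := by
    simp [fmtStep]
    omega
  rw [hstep0]
  have happ : PySem.List.enumerate (mid ++ [b]) 1
      = PySem.List.enumerate mid 1 ++ [((1 + mid.length : Int), b)] := by
    rw [PySem.List.enumerate_append]
    simp
  rw [show (0:Int) + 1 = 1 from by norm_num, happ, List.foldl_append]
  rw [foldMid mid 1 (mid.length + 2) _ (by exact fun h => h0 (by simpa [PySem.Chars.lower] using h))
    (fun k hklt => by push_cast; omega)]
  have hL : PySem.Chars.lower t0 ++ mid.flatMap (fun t => '_' :: PySem.Chars.lower t) ≠ [] := by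
    simp [PySem.Chars.lower, h0]
  simp only [List.foldl_cons, List.foldl_nil]
  rw [fmtStep_last _ _ _ hL (by push_cast; omega)]

lemma key_eq (cs : List Char) (h : cs.head? ≠ some '_') :
    (PySem.List.enumerate (PySem.Chars.splitOn cs ['_'])).foldl
        (fmtStep (PySem.Chars.splitOn cs ['_']).length) []
      = if PySem.Chars.rfind cs ['_'] = -1 then cs
        else PySem.Chars.lower (PySem.Chars.slice cs none (some (PySem.Chars.rfind cs ['_']))) ++
             PySem.Chars.slice cs (some (PySem.Chars.rfind cs ['_'])) none := by
  by_cases hmem : '_' ∈ cs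
  · obtain ⟨a, b, rfl, hb⟩ := last_sep cs hmem
    rw [rfind_at a b hb, if_neg (by omega)]
    rw [splitOn_eq, mySplit_append, mySplit_no_sep b [] hb]
    -- B side: the two slices
    rw [show PySem.Chars.slice (a ++ '_' :: b) none (some ((a.length : Int))) = a from by
      simp only [PySem.Chars.slice_eq_listSlice, PySem.List.slice_to_natCast, List.take_left]]
    rw [show PySem.Chars.slice (a ++ '_' :: b) (some ((a.length : Int))) none = '_' :: b from by
      simp only [PySem.Chars.slice_eq_listSlice, PySem.List.slice_from_natCast, List.drop_left]]
    -- the first token of a is nonempty because cs does not start with '_'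
    cases a with
    | nil => simp at h
    | cons c a' =>
      have hc : c ≠ '_' := by simpa using h
      obtain ⟨u, ts, hu⟩ := mySplit_first a' [c]
      have hsplit : mySplit [] (c :: a') = (c :: u) :: ts := by
        rw [mySplit, if_neg hc]; simpa using hu
      rw [hsplit]
      rw [show ((c :: u) :: ts) ++ [[] ++ b] = (c :: u) :: (ts ++ [b]) from by simp]
      rw [foldA_multi (c :: u) b ts (by simp)]
      -- remaining: lower (c::u) ++ flatMap = lower (c::a')
      have hjoin : (c :: u) ++ ts.flatMap (fun t => '_' :: t) = c :: a' := by
        have := joinU_mySplit (c :: a') []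
        rw [hsplit] at this
        simpa [joinU] using this
      have : PySem.Chars.lower (c :: a')
          = PySem.Chars.lower (c :: u) ++ ts.flatMap (fun t => '_' :: PySem.Chars.lower t) := by
        rw [← hjoin]
        simp only [PySem.Chars.lower, List.map_append, List.map_flatMap]
        congr 1
      rw [← this]
  · rw [rfind_no cs hmem, if_pos rfl]
    rw [splitOn_eq, mySplit_no_sep cs [] hmem]
    simpa using foldA_single cs


lemma fmtStep_nil_empty (n : Nat) : fmtStep n [] (0, ([] : List Char)) = [] := by
  simp [fmtStep, PySem.Chars.lower]

lemma shiftFold : ∀ (toks : List (List Char)) (s : Int) (m : Nat) (acc : List Char),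
    (PySem.List.enumerate toks (s + 1)).foldl (fmtStep (m + 1)) acc
      = (PySem.List.enumerate toks s).foldl (fmtStep m) acc := by
  intro toks
  induction toks with
  | nil => intro s m acc; simp [PySem.List.enumerate_nil]
  | cons t ts ih =>
    intro s m acc
    rw [PySem.List.enumerate_cons, PySem.List.enumerate_cons, List.foldl_cons, List.foldl_cons]
    have hstep : fmtStep (m + 1) acc (s + 1, t) = fmtStep m acc (s, t) := by
      simp only [fmtStep]
      congr 1
      have hiff : (s + 1 < ((m + 1 : Nat) : Int) - 1) ↔ (s < (m : Int) - 1) := by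
        push_cast; omega
      by_cases hc : s < (m : Int) - 1
      · rw [if_pos (hiff.mpr hc), if_pos hc]
      · rw [if_neg (fun h => hc (hiff.mp h)), if_neg hc]
    rw [hstep, show s + 1 + 1 = (s + 1) + 1 from rfl, ih (s + 1) m]

-- A's loop on the full string equals B's rfind/slice form on the lstripped string
lemma key_all : ∀ (cs : List Char),
    (PySem.List.enumerate (PySem.Chars.splitOn cs ['_'])).foldl
        (fmtStep (PySem.Chars.splitOn cs ['_']).length) []
      = (fun d => if PySem.Chars.rfind d ['_'] = -1 then d
          else PySem.Chars.lower (PySem.Chars.slice d none (some (PySem.Chars.rfind d ['_']))) ++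
               PySem.Chars.slice d (some (PySem.Chars.rfind d ['_'])) none)
          (cs.dropWhile (fun c => c == '_')) := by
  intro cs
  induction cs with
  | nil => exact key_eq [] (by simp)
  | cons c cs' ih =>
    by_cases hc : c = '_'
    · subst hc
      rw [List.dropWhile_cons_of_pos (by simp)]
      rw [← ih]
      rw [splitOn_eq, splitOn_eq, show mySplit [] ('_' :: cs') = [] :: mySplit [] cs' from by
        rw [mySplit, if_pos rfl]]
      rw [PySem.List.enumerate_cons, List.foldl_cons, fmtStep_nil_empty]
      rw [List.length_cons]
      exact shiftFold (mySplit [] cs') 0 (mySplit [] cs').length []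
    · rw [List.dropWhile_cons_of_neg (by simp [hc])]
      exact key_eq (c :: cs') (by simp [hc])

-- ===== VERDICT (by name: the statement is the Claim_ definition above) =====
theorem format_tag_spec : Claim_equal_format_tag := by
  intro tag _
  show format_tag tag = format_tag_alt tag
  simp only [format_tag, format_tag_alt]
  rw [key_all, apply_ite String.ofList]
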